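-- pv_equiv track=rewrite | github.com/Sagarss2664/PDF_Extraction_Tool | backend/app/services/excel_generator.py | _find_best_template_match
-- ===== SOURCE A (Python) =====
-- from typing import Dict, Any, List, Tuple
--
-- def _find_best_template_match(data_key: str, template_sections: List[str], template_id: int) -> str:
--     """Find the best matching template section for a data key"""
--     data_key_lower = data_key.lower()
--
--     # Template-specific matching patterns
--     template_patterns = {
--         1: {
--             'fund': ['fund', 'vehicle', 'investment'],
--             'manager': ['manager', 'gp', 'general partner'],
--             'financial': ['financial', 'position', 'nav', 'irr'],
--             'cashflows': ['cashflow', 'lp', 'investor', 'transaction'],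
--             'companies': ['company', 'portfolio'],
--             'investments': ['investment', 'initial', 'commitment'],
--             'valuation': ['valuation', 'value'],
--             'financials': ['financial', 'revenue', 'ebitda'],
--             'history': ['history', 'transaction'],
--             'reference': ['reference', 'country', 'currency']
--         },
--         2: {
--             'executive': ['executive', 'summary', 'overview'],
--             'schedule': ['schedule', 'investment'],
--             'operations': ['operation', 'income', 'revenue'],
--             'cashflows': ['cashflow', 'cash'],
--             'pcap': ['pcap', 'capital', 'account'],
--             'profile': ['profile', 'company'],
--             'financials': ['financial', 'revenue', 'ebitda'],
--             'footnotes': ['footnote', 'note', 'disclosure'],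
--             'reference': ['reference', 'country', 'currency']
--         }
--     }
--
--     patterns = template_patterns.get(template_id, {})
--     best_score = 0
--     best_match = None
--
--     for section in template_sections:
--         section_lower = section.lower()
--         score = 0
--
--         # Check for direct matches
--         if data_key_lower == section_lower:
--             return section
--
--         # Check for partial matches
--         if data_key_lower in section_lower or section_lower in data_key_lower:
--             score += 3
--
--         # Check for pattern matches
--         for pattern_key, pattern_terms in patterns.items():
--             if pattern_key in section_lower:
--                 for term in pattern_terms:
--                     if term in data_key_lower:
--                         score += 2
--                         break
--
--         # Check for word overlap
--         data_words = set(data_key_lower.split('_'))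
--         section_words = set(section_lower.split('_'))
--         common_words = data_words.intersection(section_words)
--         score += len(common_words)
--
--         if score > best_score:
--             best_score = score
--             best_match = section
--
--     return best_match if best_score >= 2 else None
-- ===== SOURCE B (Python) =====
-- from typing import List
--
-- _TEMPLATE_PATTERNS = {
--     1: {
--         'fund': ['fund', 'vehicle', 'investment'],
--         'manager': ['manager', 'gp', 'general partner'],
--         'financial': ['financial', 'position', 'nav', 'irr'],
--         'cashflows': ['cashflow', 'lp', 'investor', 'transaction'],
--         'companies': ['company', 'portfolio'],
--         'investments': ['investment', 'initial', 'commitment'],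
--         'valuation': ['valuation', 'value'],
--         'financials': ['financial', 'revenue', 'ebitda'],
--         'history': ['history', 'transaction'],
--         'reference': ['reference', 'country', 'currency']
--     },
--     2: {
--         'executive': ['executive', 'summary', 'overview'],
--         'schedule': ['schedule', 'investment'],
--         'operations': ['operation', 'income', 'revenue'],
--         'cashflows': ['cashflow', 'cash'],
--         'pcap': ['pcap', 'capital', 'account'],
--         'profile': ['profile', 'company'],
--         'financials': ['financial', 'revenue', 'ebitda'],
--         'footnotes': ['footnote', 'note', 'disclosure'],
--         'reference': ['reference', 'country', 'currency']
--     }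
-- }
--
--
-- def _find_best_template_match(data_key: str, template_sections: List[str], template_id: int) -> str:
--     """Rank-by-stable-sort variant: exact-match scan, then sort sections by
--     descending score (Python's sort is stable, so ties keep original order)
--     and take the top of the ranking."""
--     data_key_lower = data_key.lower()
--
--     # First section whose lowercase form equals the key wins outright.
--     for section in template_sections:
--         if section.lower() == data_key_lower:
--             return section
--
--     patterns = _TEMPLATE_PATTERNS.get(template_id, {})
--     data_words = set(data_key_lower.split('_'))
--
--     def score(section: str) -> int:
--         section_lower = section.lower()
--         return (
--             (3 if data_key_lower in section_lower or section_lower in data_key_lower else 0)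
--             + 2 * sum(1 for pk, terms in patterns.items()
--                       if pk in section_lower and any(t in data_key_lower for t in terms))
--             + len(data_words & set(section_lower.split('_')))
--         )
--
--     # Stable descending ranking: ranked[0] is the FIRST section attaining the
--     # maximal score, which matches a strictly-greater running-best rule.
--     ranked = sorted(template_sections, key=lambda s: -score(s))
--     if ranked and score(ranked[0]) >= 2:
--         return ranked[0]
--     return None
-- ===== Notes on version B (the rewrite author's own statement) =====
-- stated objective: alternative
-- what changed: Replaced A's single running-(best_score,best_match) loop with a decorate-and-rank strategy: after an exact-match scan, all sections are stably sorted by descending score (ties keep original order, reproducing the first-strictly-greater rule) and the top of the ranking is returned if it scores >= 2; the pattern contribution is a counted comprehension (2*sum) instead of a break-on-first-term accumulator loop, and the data-key word-set is built once instead of per section.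
import Mathlib
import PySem

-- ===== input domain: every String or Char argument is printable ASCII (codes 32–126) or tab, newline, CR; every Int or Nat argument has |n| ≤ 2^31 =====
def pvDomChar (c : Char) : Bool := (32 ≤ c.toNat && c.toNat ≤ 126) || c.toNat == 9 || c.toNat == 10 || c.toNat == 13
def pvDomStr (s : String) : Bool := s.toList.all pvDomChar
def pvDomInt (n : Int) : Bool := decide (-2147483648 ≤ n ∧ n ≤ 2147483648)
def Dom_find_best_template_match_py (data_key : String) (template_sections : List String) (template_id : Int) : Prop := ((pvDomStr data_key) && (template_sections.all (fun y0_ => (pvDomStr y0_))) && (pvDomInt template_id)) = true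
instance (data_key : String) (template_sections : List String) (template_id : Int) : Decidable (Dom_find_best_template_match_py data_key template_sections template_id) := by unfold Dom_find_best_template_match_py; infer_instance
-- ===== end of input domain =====

-- B replaces A's running-best loop by an exact-match scan followed by a stable sort by descending score (ties keep original order), taking the head; objective: alternative.


-- the template_patterns dict literal (identical data in both Pythons: inline in A, a module constant in B)
def pvTemplatePatterns : PySem.Dict Int (List (String × List String)) :=
  PySem.Dict.mk
  [((1:Int), [("fund", ["fund", "vehicle", "investment"]),
        ("manager", ["manager", "gp", "general partner"]),
        ("financial", ["financial", "position", "nav", "irr"]),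
        ("cashflows", ["cashflow", "lp", "investor", "transaction"]),
        ("companies", ["company", "portfolio"]),
        ("investments", ["investment", "initial", "commitment"]),
        ("valuation", ["valuation", "value"]),
        ("financials", ["financial", "revenue", "ebitda"]),
        ("history", ["history", "transaction"]),
        ("reference", ["reference", "country", "currency"])]),
   (2, [("executive", ["executive", "summary", "overview"]),
        ("schedule", ["schedule", "investment"]),
        ("operations", ["operation", "income", "revenue"]),
        ("cashflows", ["cashflow", "cash"]),
        ("pcap", ["pcap", "capital", "account"]),
        ("profile", ["profile", "company"]),
        ("financials", ["financial", "revenue", "ebitda"]),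
        ("footnotes", ["footnote", "note", "disclosure"]),
        ("reference", ["reference", "country", "currency"])])]

-- s.lower().split('_') word set; split? is some since the separator "_" is nonempty
def pvWords (sLower : String) : PySem.Set String :=
  PySem.Set.ofList ((PySem.Str.split? sLower "_").getD [])

-- ===== PORT A =====
-- A's single loop: early return on exact match, else score and keep (best_score, best_match)
def pvALoop (dkl : String) (pats : List (String × List String)) :
    List String → Int → Option String → Option String
  | [], best_score, best_match => if 2 ≤ best_score then best_match else none
  | sec :: rest, best_score, best_match =>
    let sl := PySem.Str.lower sec
    if dkl == sl then some sec
    else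
      let s1 : Int := if PySem.Str.isIn dkl sl || PySem.Str.isIn sl dkl then 3 else 0
      -- inner 'for term in pattern_terms: … break' = first hit adds 2 once = any
      let s2 := pats.foldl
        (fun sc pt =>
          if PySem.Str.isIn pt.1 sl then
            (if pt.2.any (fun term => PySem.Str.isIn term dkl) then sc + 2 else sc)
          else sc) s1
      let score := s2 + PySem.Set.len (PySem.Set.inter (pvWords dkl) (pvWords sl))
      if best_score < score then pvALoop dkl pats rest score (some sec)
      else pvALoop dkl pats rest best_score best_match

def find_best_template_match_py (data_key : String) (template_sections : List String) (template_id : Int) : Option String :=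
  let data_key_lower := PySem.Str.lower data_key
  let patterns := pvTemplatePatterns.getD template_id []
  pvALoop data_key_lower patterns template_sections 0 none

-- ===== PORT B =====
-- pass 1: first section whose lowercase form equals the key
def pvFirstExact (dkl : String) : List String → Option String
  | [] => none
  | sec :: rest => if PySem.Str.lower sec == dkl then some sec else pvFirstExact dkl rest

-- B's score helper: partial match + 2*(count of pattern hits) + word overlap
def pvBScore (dkl : String) (dwords : PySem.Set String) (pats : List (String × List String)) (sec : String) : Int :=
  let sl := PySem.Str.lower sec
  (if PySem.Str.isIn dkl sl || PySem.Str.isIn sl dkl then (3:Int) else 0)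
  + 2 * (pats.countP (fun pt => PySem.Str.isIn pt.1 sl && pt.2.any (fun t => PySem.Str.isIn t dkl)) : Int)
  + PySem.Set.len (PySem.Set.inter dwords (pvWords sl))

def find_best_template_match_py_alt (data_key : String) (template_sections : List String) (template_id : Int) : Option String :=
  let dkl := PySem.Str.lower data_key
  match pvFirstExact dkl template_sections with
  | some s => some s
  | none =>
    let pats := pvTemplatePatterns.getD template_id []
    let dwords := pvWords dkl
    -- ranked = sorted(sections, key=lambda s: -score(s)); stable, so ranked[0] is the first maximal section
    match PySem.List.sorted template_sections (fun s => -(pvBScore dkl dwords pats s)) false with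
    | [] => none
    | best :: _ => if 2 ≤ pvBScore dkl dwords pats best then some best else none

-- ===== PRECONDITION & SPEC =====
def Spec_find_best_template_match_py (data_key : String) (template_sections : List String) (template_id : Int) (out : Option String) : Prop := out = find_best_template_match_py_alt data_key template_sections template_id
instance (data_key : String) (template_sections : List String) (template_id : Int) (out : Option String) : Decidable (Spec_find_best_template_match_py data_key template_sections template_id out) := by unfold Spec_find_best_template_match_py; infer_instance

-- ===== CLAIM (what is proved, stated in full; the proofs are below) =====
def Claim_equal_find_best_template_match_py : Prop := ∀ (data_key : String) (template_sections : List String) (template_id : Int), Dom_find_best_template_match_py data_key template_sections template_id → Spec_find_best_template_match_py data_key template_sections template_id (find_best_template_match_py data_key template_sections template_id)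

-- ===== LEMMAS AND PROOFS =====

-- A's accumulator step, with K the per-section score
def pvStep (K : String → Int) (p : Int × Option String) (x : String) : Int × Option String :=
  if p.1 < K x then (K x, some x) else p

-- the running first-argmax (strict-greater update) starting at m
def pvBest (K : String → Int) (m : String) (l : List String) : String :=
  l.foldl (fun b x => if K b < K x then x else b) m

-- option-valued variant used to bridge A's (score, match) pair to pvBest
def pvMaxStep (K : String → Int) (acc : Option String) (x : String) : Option String :=
  match acc with
  | none => some x
  | some m => if K m < K x then some x else some m

-- relation between A's (best_score, best_match) accumulator and pvMaxStep's accumulator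
def pvR (K : String → Int) (p : Int × Option String) (a : Option String) : Prop :=
  match a with
  | none => p = (0, none)
  | some m => (0 < K m ∧ p = (K m, some m)) ∨ (K m = 0 ∧ p = (0, none))

theorem pvBScore_nonneg (dkl : String) (dwords : PySem.Set String)
    (pats : List (String × List String)) (s : String) : 0 ≤ pvBScore dkl dwords pats s := by
  unfold pvBScore
  have h1 : (0:Int) ≤ (if PySem.Str.isIn dkl (PySem.Str.lower s) || PySem.Str.isIn (PySem.Str.lower s) dkl then (3:Int) else 0) := by
    split <;> omega
  have h2 : (0:Int) ≤ 2 * ((pats.countP (fun pt => PySem.Str.isIn pt.1 (PySem.Str.lower s) && pt.2.any (fun t => PySem.Str.isIn t dkl))) : Int) := by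
    positivity
  have h3 : (0:Int) ≤ PySem.Set.len (PySem.Set.inter dwords (pvWords (PySem.Str.lower s))) := by
    simp [PySem.Set.len]
  dsimp only
  omega

-- A's break-on-first-term accumulator loop is 2 * (count of pattern hits)
theorem pvPatFold (dkl sl : String) (pats : List (String × List String)) :
    ∀ a : Int, pats.foldl
      (fun sc pt =>
        if PySem.Str.isIn pt.1 sl then
          (if pt.2.any (fun term => PySem.Str.isIn term dkl) then sc + 2 else sc)
        else sc) a
      = a + 2 * (pats.countP (fun pt => PySem.Str.isIn pt.1 sl && pt.2.any (fun t => PySem.Str.isIn t dkl)) : Int) := by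
  induction pats with
  | nil => intro a; simp
  | cons pt rest ih =>
    intro a
    simp only [List.foldl_cons, List.countP_cons]
    rw [show (if PySem.Str.isIn pt.1 sl = true then
          (if pt.2.any (fun term => PySem.Str.isIn term dkl) = true then a + 2 else a) else a)
        = a + (if (PySem.Str.isIn pt.1 sl && pt.2.any (fun t => PySem.Str.isIn t dkl)) = true then 2 else 0) from by
      cases PySem.Str.isIn pt.1 sl <;> cases pt.2.any (fun t => PySem.Str.isIn t dkl) <;> simp]
    rw [ih]
    cases h : (PySem.Str.isIn pt.1 sl && pt.2.any (fun t => PySem.Str.isIn t dkl)) <;>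
      simp <;> omega

-- A's inline score expression equals B's score helper
theorem pvScore_eq (dkl : String) (pats : List (String × List String)) (s : String) :
    pats.foldl
      (fun sc pt =>
        if PySem.Str.isIn pt.1 (PySem.Str.lower s) then
          (if pt.2.any (fun term => PySem.Str.isIn term dkl) then sc + 2 else sc)
        else sc)
      (if PySem.Str.isIn dkl (PySem.Str.lower s) || PySem.Str.isIn (PySem.Str.lower s) dkl then (3:Int) else 0)
    + PySem.Set.len (PySem.Set.inter (pvWords dkl) (pvWords (PySem.Str.lower s)))
    = pvBScore dkl (pvWords dkl) pats s := by
  unfold pvBScore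
  rw [pvPatFold]

-- when pass 1 finds an exact match, A's loop returns it whatever its accumulator holds
theorem pvALoop_exact (dkl : String) (pats : List (String × List String)) :
    ∀ (l : List String) (bs : Int) (bm : Option String) (s : String),
      pvFirstExact dkl l = some s → pvALoop dkl pats l bs bm = some s := by
  intro l
  induction l with
  | nil => intro bs bm s h; simp [pvFirstExact] at h
  | cons x rest ih =>
    intro bs bm s h
    by_cases hx : PySem.Str.lower x = dkl
    · rw [pvFirstExact, if_pos (beq_iff_eq.mpr hx)] at h
      rw [pvALoop, if_pos (beq_iff_eq.mpr hx.symm)]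
      exact h
    · rw [pvFirstExact, if_neg (by simp [hx])] at h
      rw [pvALoop, if_neg (by simp [Ne.symm hx])]
      dsimp only
      split
      · split
        · exact ih _ _ _ h
        · exact ih _ _ _ h
      · split
        · exact ih _ _ _ h
        · exact ih _ _ _ h

-- with no exact match, A's loop is a fold of pvStep followed by the ≥2 gate
theorem pvALoop_no_exact (dkl : String) (pats : List (String × List String)) :
    ∀ (l : List String) (bs : Int) (bm : Option String),
      pvFirstExact dkl l = none →
      pvALoop dkl pats l bs bm =
        (let r := l.foldl (pvStep (pvBScore dkl (pvWords dkl) pats)) (bs, bm)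
         if 2 ≤ r.1 then r.2 else none) := by
  intro l
  induction l with
  | nil => intro bs bm _; simp [pvALoop]
  | cons x rest ih =>
    intro bs bm h
    have hx : PySem.Str.lower x ≠ dkl := by
      intro he
      rw [pvFirstExact, if_pos (beq_iff_eq.mpr he)] at h
      exact Option.some_ne_none _ h
    have hrest : pvFirstExact dkl rest = none := by
      rwa [pvFirstExact, if_neg (by simp [hx])] at h
    rw [pvALoop, if_neg (by simp [Ne.symm hx])]
    dsimp only
    rw [pvScore_eq dkl pats x]
    simp only [List.foldl_cons, pvStep]
    split
    · exact ih _ _ hrest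
    · exact ih _ _ hrest

-- the fold of pvStep and pvMaxStep's fold stay related by pvR
theorem pvFold_rel (K : String → Int) (hK : ∀ s, 0 ≤ K s) :
    ∀ (l : List String) (p : Int × Option String) (a : Option String),
      pvR K p a →
      pvR K (l.foldl (pvStep K) p) (l.foldl (pvMaxStep K) a) := by
  intro l
  induction l with
  | nil => intro p a h; exact h
  | cons x rest ih =>
    intro p a h
    simp only [List.foldl_cons, pvMaxStep]
    apply ih
    cases a with
    | none =>
      simp only [pvR] at h
      subst h
      by_cases hx : 0 < K x
      · simp [pvStep, pvR, hx]
      · have : K x = 0 := le_antisymm (by omega) (hK x)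
        simp [pvStep, pvR, this]
    | some m =>
      dsimp only
      rcases h with ⟨hm, hp⟩ | ⟨hm, hp⟩
      · subst hp
        by_cases hlt : K m < K x
        · rw [if_pos hlt]
          simp only [pvStep, hlt, if_pos]
          simp only [pvR]
          left; exact ⟨lt_of_lt_of_le hm (le_of_lt hlt), trivial⟩
        · rw [if_neg hlt]
          simp only [pvStep, hlt, if_neg, not_false_iff]
          simp only [pvR]
          left; exact ⟨hm, trivial⟩
      · subst hp
        by_cases hlt : K m < K x
        · have hx : 0 < K x := by omega
          rw [if_pos hlt]
          simp only [pvStep]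
          simp only [hx, if_pos]
          simp only [pvR]
          left; exact ⟨hx, trivial⟩
        · have hx : K x = 0 := le_antisymm (by omega) (hK x)
          rw [if_neg hlt]
          simp only [pvStep, hx]
          simp only [pvR]
          right
          exact ⟨hm, by simp⟩

-- pvMaxStep's fold started at some m is the running first-argmax pvBest
theorem pvFold_maxstep_some (K : String → Int) :
    ∀ (l : List String) (m : String), l.foldl (pvMaxStep K) (some m) = some (pvBest K m l) := by
  intro l
  induction l with
  | nil => intro m; rfl
  | cons x rest ih =>
    intro m
    simp only [List.foldl_cons, pvMaxStep, pvBest, List.foldl_cons]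
    split <;> exact ih _

-- insertBy (strictly-less test on the key) preserves key-sortedness
theorem pvInsertBy_pairwise (K : String → Int) (x : String) :
    ∀ (l : List String), l.Pairwise (fun a b => -(K a) ≤ -(K b)) →
      (PySem.List.insertBy (fun a b => decide ((-(K a) : Int) < -(K b))) x l).Pairwise
        (fun a b => -(K a) ≤ -(K b)) := by
  intro l
  induction l with
  | nil => intro _; simp [PySem.List.insertBy]
  | cons m t ih =>
    intro h
    rw [List.pairwise_cons] at h
    rw [PySem.List.insertBy]
    by_cases hlt : (-(K x) : Int) < -(K m)
    · rw [if_pos (by simpa using hlt)]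
      refine List.pairwise_cons.mpr ⟨?_, List.pairwise_cons.mpr h⟩
      intro y hy
      rcases List.mem_cons.mp hy with rfl | hy
      · omega
      · have := h.1 y hy; omega
    · rw [if_neg (by simpa using hlt)]
      refine List.pairwise_cons.mpr ⟨?_, ih h.2⟩
      intro y hy
      rcases (PySem.List.mem_insertBy _ _ _ _).mp hy with rfl | hy
      · omega
      · exact h.1 y hy

-- head of the insertion-sort fold is the running first-argmax
theorem pvSortHead (K : String → Int) :
    ∀ (xs : List String) (m : String) (t : List String),
      (m :: t).Pairwise (fun a b => -(K a) ≤ -(K b)) →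
      ∃ t', xs.foldl (fun acc x => PySem.List.insertBy (fun a b => decide ((-(K a) : Int) < -(K b))) x acc) (m :: t)
              = pvBest K m xs :: t' ∧
            (pvBest K m xs :: t').Pairwise (fun a b => -(K a) ≤ -(K b)) := by
  intro xs
  induction xs with
  | nil => intro m t h; exact ⟨t, rfl, h⟩
  | cons x rest ih =>
    intro m t h
    have hp := pvInsertBy_pairwise K x (m :: t) h
    simp only [List.foldl_cons]
    rw [PySem.List.insertBy] at hp ⊢
    by_cases hlt : (-(K x) : Int) < -(K m)
    · rw [if_pos (by simpa using hlt)] at hp ⊢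
      have hKm : K m < K x := by omega
      obtain ⟨t', h1, h2⟩ := ih x (m :: t) hp
      refine ⟨t', ?_, ?_⟩
      · rw [h1]; simp [pvBest, List.foldl_cons, hKm]
      · rw [show pvBest K m (x :: rest) = pvBest K x rest by simp [pvBest, List.foldl_cons, hKm]]
        exact h2
    · rw [if_neg (by simpa using hlt)] at hp ⊢
      have hKm : ¬ K m < K x := by omega
      obtain ⟨t', h1, h2⟩ := ih m (PySem.List.insertBy (fun a b => decide ((-(K a) : Int) < -(K b))) x t) hp
      refine ⟨t', ?_, ?_⟩
      · rw [h1]; simp [pvBest, List.foldl_cons, hKm]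
      · rw [show pvBest K m (x :: rest) = pvBest K m rest by simp [pvBest, List.foldl_cons, hKm]]
        exact h2

-- sorted(s0 :: rest, key = -K) starts with the running first-argmax of K
theorem pvSorted_head (K : String → Int) (s0 : String) (rest : List String) :
    ∃ t', PySem.List.sorted (s0 :: rest) (fun s => -(K s)) false = pvBest K s0 rest :: t' := by
  rw [PySem.List.sorted_eq_foldl_insertBy]
  simp only [List.foldl_cons]
  have h0 : PySem.List.insertBy (fun a b => decide ((-(K a) : Int) < -(K b))) s0 [] = [s0] := by
    simp [PySem.List.insertBy]
  rw [h0]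
  obtain ⟨t', h1, _⟩ := pvSortHead K rest s0 [] (by simp)
  exact ⟨t', h1⟩

-- ===== VERDICT (by name: the statement is the Claim_ definition above) =====
theorem find_best_template_match_py_spec : Claim_equal_find_best_template_match_py := by
  unfold Claim_equal_find_best_template_match_py
  intro data_key template_sections template_id _
  unfold Spec_find_best_template_match_py
  unfold find_best_template_match_py find_best_template_match_py_alt
  set dkl := PySem.Str.lower data_key with hdkl
  set pats := pvTemplatePatterns.getD template_id [] with hpats
  cases hfe : pvFirstExact dkl template_sections with
  | some s =>
    simp only [hfe]
    exact pvALoop_exact dkl pats template_sections 0 none s hfe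
  | none =>
    simp only [hfe]
    cases template_sections with
    | nil => simp [pvALoop, PySem.List.sorted]
    | cons s0 rest =>
      rw [pvALoop_no_exact dkl pats (s0 :: rest) 0 none hfe]
      set K := pvBScore dkl (pvWords dkl) pats with hK
      obtain ⟨t', hsort⟩ := pvSorted_head K s0 rest
      rw [hsort]
      have ha : (s0 :: rest).foldl (pvMaxStep K) none = some (pvBest K s0 rest) := by
        simp only [List.foldl_cons, pvMaxStep]
        exact pvFold_maxstep_some K rest s0
      have hrel := pvFold_rel K (fun s => pvBScore_nonneg dkl (pvWords dkl) pats s)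
        (s0 :: rest) (0, none) none (by simp [pvR])
      rw [ha] at hrel
      set m := pvBest K s0 rest
      rcases hrel with ⟨hm, hp⟩ | ⟨hm, hp⟩
      · rw [hp]
      · rw [hp]
        simp [hm]
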